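-- pv_equiv track=rewrite | github.com/odoo/odoo | venv/Lib/site-packages/stdnum/ua/edrpou.py | calc_check_digit
-- ===== SOURCE A (Python) =====
-- def calc_check_digit(number):
--     """Calculate the check digit for number."""
--     weights = (1, 2, 3, 4, 5, 6, 7)
--     if number[0] in '345':
--         weights = (7, 1, 2, 3, 4, 5, 6)
--     total = sum(w * int(n) for w, n in zip(weights, number))
--     if total % 11 < 10:
--         return str(total % 11)
--     # Calculate again with other weights
--     weights = tuple(w + 2 for w in weights)
--     total = sum(w * int(n) for w, n in zip(weights, number))
--     return str(total % 11)
-- ===== SOURCE B (Python) =====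
-- def calc_check_digit(number):
--     """Calculate the check digit for number."""
--     off = 6 if number[0] in '345' else 0
--
--     def go(i, chars):
--         # recursion over the digit characters; the weight at position i is
--         # derived arithmetically as (i + off) % 7 + 1 (no weight tuples), and
--         # both the plain and the +2-shifted weighted totals are accumulated
--         # in the same recursion.
--         if i >= 7 or not chars:
--             return (0, 0)
--         d = int(chars[0])
--         t1, t2 = go(i + 1, chars[1:])
--         w = (i + off) % 7 + 1
--         return (t1 + w * d, t2 + (w + 2) * d)
--
--     t1, t2 = go(0, number)
--     r = t1 % 11
--     return str(r if r < 10 else t2 % 11)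
-- ===== Notes on version B (the rewrite author's own statement) =====
-- stated objective: alternative
-- what changed: B replaces the weight tuples and the two staged zip/sum passes by a single recursion over the characters that derives each weight arithmetically as (i+off)%7+1 and accumulates both the plain and the +2-shifted weighted totals simultaneously, selecting between them at the end.
import Mathlib
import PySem

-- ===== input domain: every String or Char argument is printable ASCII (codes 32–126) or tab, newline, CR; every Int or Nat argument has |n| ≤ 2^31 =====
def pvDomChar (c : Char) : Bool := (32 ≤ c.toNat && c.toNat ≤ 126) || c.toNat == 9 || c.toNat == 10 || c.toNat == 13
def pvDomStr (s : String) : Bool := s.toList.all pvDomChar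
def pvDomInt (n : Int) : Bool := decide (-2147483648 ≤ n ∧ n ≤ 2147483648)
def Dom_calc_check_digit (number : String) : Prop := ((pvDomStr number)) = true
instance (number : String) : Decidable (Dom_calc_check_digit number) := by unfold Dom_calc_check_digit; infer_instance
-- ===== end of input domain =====

-- B drops the weight tuples and the two staged zip/sum passes: one recursion over the
-- characters derives each weight arithmetically as (i+off)%7+1 and accumulates both the
-- plain and the +2-shifted weighted totals at once (alternative decomposition).


-- ===== PORT A =====
-- int(n) for the single character n; Pre_ guarantees n is an ASCII digit, so getD 0 is never reached
def pvDigitA (c : Char) : Int := (PySem.Int.ofChars? [c]).getD 0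

def calc_check_digit (number : String) : String :=
  match number.toList with
  | [] => ""          -- Python raises IndexError on number[0]; excluded by Pre_
  | c0 :: _ =>
    let weights : List Int :=
      if c0 ∈ ['3', '4', '5'] then [7, 1, 2, 3, 4, 5, 6] else [1, 2, 3, 4, 5, 6, 7]
    let total := ((weights.zip number.toList).map (fun p => p.1 * pvDigitA p.2)).sum
    if PySem.Int.mod total 11 < 10 then
      PySem.Int.toStr (PySem.Int.mod total 11)
    else
      let weights2 := weights.map (fun w => w + 2)
      let total2 := ((weights2.zip number.toList).map (fun p => p.1 * pvDigitA p.2)).sum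
      PySem.Int.toStr (PySem.Int.mod total2 11)

-- ===== PORT B =====
def pvDigitB (c : Char) : Int := (PySem.Int.ofChars? [c]).getD 0

-- Source B's inner 'go': recursion over the characters with position index i
def pvGo (off : Nat) : Nat → List Char → Int × Int
  | _, [] => (0, 0)
  | i, c :: rest =>
    if 7 ≤ i then (0, 0)
    else
      let d := pvDigitB c
      let t := pvGo off (i + 1) rest
      let w : Int := (((i + off) % 7 : Nat) : Int) + 1
      (t.1 + w * d, t.2 + (w + 2) * d)

def calc_check_digit_alt (number : String) : String :=
  match number.toList with
  | [] => ""          -- Python raises IndexError on number[0]; excluded by Pre_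
  | c0 :: _ =>
    let off : Nat := if c0 ∈ ['3', '4', '5'] then 6 else 0
    let t := pvGo off 0 number.toList
    let r := PySem.Int.mod t.1 11
    PySem.Int.toStr (if r < 10 then r else PySem.Int.mod t.2 11)

-- ===== PRECONDITION & SPEC =====
-- Pre_ excludes exactly the inputs where A raises: the empty string (IndexError on number[0])
-- and any non-digit among the first min(7, len) characters (ValueError from int(n)).
def Pre_calc_check_digit (number : String) : Prop :=
  number ≠ "" ∧ PySem.Str.strIsdigit (PySem.Str.slice number none (some 7)) = true
instance (number : String) : Decidable (Pre_calc_check_digit number) := by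
  unfold Pre_calc_check_digit; infer_instance

def pvWitness_calc_check_digit : String := "1234567"

def Spec_calc_check_digit (number : String) (out : String) : Prop := out = calc_check_digit_alt number
instance (number : String) (out : String) : Decidable (Spec_calc_check_digit number out) := by unfold Spec_calc_check_digit; infer_instance

-- ===== CLAIM (what is proved, stated in full; the proofs are below) =====
def Claim_equal_calc_check_digit : Prop := ∀ (number : String), Dom_calc_check_digit number → Pre_calc_check_digit number → Spec_calc_check_digit number (calc_check_digit number)

-- ===== LEMMAS AND PROOFS =====

theorem pvGo_stop (off : Nat) (l : List Char) : pvGo off 7 l = (0, 0) := by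
  cases l <;> simp [pvGo]

-- with off = 0 the recursion produces exactly A's two zip/sum totals for weights 1..7 / 3..9
theorem pvGo_zero (l : List Char) :
    pvGo 0 0 l
      = (((([1,2,3,4,5,6,7] : List Int).zip l).map (fun p => p.1 * pvDigitB p.2)).sum,
         ((([3,4,5,6,7,8,9] : List Int).zip l).map (fun p => p.1 * pvDigitB p.2)).sum) := by
  rcases l with _|⟨a,_|⟨b,_|⟨c,_|⟨d,_|⟨e,_|⟨f,_|⟨g,rest⟩⟩⟩⟩⟩⟩⟩ <;>
    simp [pvGo, pvGo_stop] <;> constructor <;> ring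

-- with off = 6 it produces the totals for the rotated weights 7,1..6 / 9,3..8
theorem pvGo_six (l : List Char) :
    pvGo 6 0 l
      = (((([7,1,2,3,4,5,6] : List Int).zip l).map (fun p => p.1 * pvDigitB p.2)).sum,
         ((([9,3,4,5,6,7,8] : List Int).zip l).map (fun p => p.1 * pvDigitB p.2)).sum) := by
  rcases l with _|⟨a,_|⟨b,_|⟨c,_|⟨d,_|⟨e,_|⟨f,_|⟨g,rest⟩⟩⟩⟩⟩⟩⟩ <;>
    simp [pvGo, pvGo_stop] <;> constructor <;> ring

-- ===== VERDICT (by name: the statement is the Claim_ definition above) =====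
theorem calc_check_digit_spec : Claim_equal_calc_check_digit := by
  intro number _ _
  unfold Spec_calc_check_digit calc_check_digit calc_check_digit_alt
  cases h : number.toList with
  | nil => rfl
  | cons c0 rest =>
    have hd : pvDigitA = pvDigitB := rfl
    by_cases hm : c0 ∈ ['3', '4', '5'] <;>
      simp only [hm, if_true, if_false, pvGo_zero, pvGo_six, hd] <;>
      split_ifs <;> simp_all
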